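-- pv_equiv track=rewrite | github.com/chunhuizhao478/farmsquakeworx | applications/dynamiccdbm_f_app/generate_input.py | process_conditionals
-- ===== SOURCE A (Python) =====
-- def process_conditionals(text, features):
--     """Process #{IF FEATURE} ... #{ENDIF FEATURE} blocks in template text."""
--     lines = text.split("\n")
--     result = []
--     skip_stack = []  # stack of booleans: True = currently skipping
--
--     for line in lines:
--         stripped = line.strip()
--
--         if stripped.startswith("#{IF "):
--             feature = stripped[len("#{IF "):-1] if stripped.endswith("}") else stripped[len("#{IF "):]
--             feature = feature.strip().rstrip("}")
--             active = features.get(feature, False)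
--             skip_stack.append(not active)
--             continue
--
--         if stripped.startswith("#{ENDIF "):
--             if skip_stack:
--                 skip_stack.pop()
--             continue
--
--         if skip_stack and any(skip_stack):
--             continue
--
--         result.append(line)
--
--     return "\n".join(result)
-- ===== SOURCE B (Python) =====
-- def process_conditionals(text, features):
--     """Process #{IF FEATURE} ... #{ENDIF FEATURE} blocks in template text.
--
--     Recursive-descent parser: each #{IF} opens a block parsed by a recursive
--     helper that returns the block's kept body and the position after its
--     matching #{ENDIF}; the body is spliced in only if the feature is active.
--     No skip state is threaded through the scan at all.
--     """
--     lines = text.split("\n")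
--     n = len(lines)
--
--     def parse_block(i):
--         # consume lines[i:] up to (and including) the closing ENDIF or EOF;
--         # return (kept body lines, index just past the block)
--         kept = []
--         while i < n:
--             s = lines[i].strip()
--             if s.startswith("#{IF "):
--                 feature = (s[5:-1] if s.endswith("}") else s[5:]).strip().rstrip("}")
--                 body, i = parse_block(i + 1)
--                 if features.get(feature, False):
--                     kept.extend(body)
--             elif s.startswith("#{ENDIF "):
--                 return kept, i + 1
--             else:
--                 kept.append(lines[i])
--                 i += 1
--         return kept, i
--
--     out = []
--     i = 0
--     while i < n:
--         s = lines[i].strip()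
--         if s.startswith("#{IF "):
--             feature = (s[5:-1] if s.endswith("}") else s[5:]).strip().rstrip("}")
--             body, i = parse_block(i + 1)
--             if features.get(feature, False):
--                 out.extend(body)
--         elif s.startswith("#{ENDIF "):
--             i += 1  # stray ENDIF at top level: dropped, nothing to close
--         else:
--             out.append(lines[i])
--             i += 1
--     return "\n".join(out)
-- ===== Notes on version B (the rewrite author's own statement) =====
-- stated objective: alternative
-- what changed: Replaces A's line-by-line scan with a boolean skip-stack re-scanned by any() per line by a recursive-descent parser: each #{IF} block is parsed into its kept body by a recursive helper returning (body, next index), and the body is spliced in only if the feature is active, so no skip state exists at all.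
import Mathlib
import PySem

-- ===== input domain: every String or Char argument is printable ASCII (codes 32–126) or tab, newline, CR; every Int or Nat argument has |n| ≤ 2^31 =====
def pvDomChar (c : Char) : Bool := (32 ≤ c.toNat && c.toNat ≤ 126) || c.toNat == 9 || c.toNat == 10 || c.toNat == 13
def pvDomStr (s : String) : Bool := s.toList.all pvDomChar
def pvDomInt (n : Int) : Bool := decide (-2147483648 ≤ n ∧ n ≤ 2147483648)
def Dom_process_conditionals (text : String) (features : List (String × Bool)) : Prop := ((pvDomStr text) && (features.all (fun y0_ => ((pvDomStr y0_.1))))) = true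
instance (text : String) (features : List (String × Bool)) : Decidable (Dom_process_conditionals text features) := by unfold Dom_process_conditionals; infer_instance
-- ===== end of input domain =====

-- B replaces A's boolean skip-stack (re-scanned with any() on every line) by a recursive-descent
-- parser that builds each #{IF} block's body recursively and splices it in only when the feature
-- is active (objective: alternative).

-- shared per-line parsing helpers (identical text manipulation in both Pythons)
-- text.split("\n"): sep is the nonempty literal "\n", exact via Chars.splitOn
def pcSplitLines (text : String) : List String :=
  (PySem.Chars.splitOn text.toList ['\n']).map String.ofList

-- s.rstrip("}") : drop trailing '}' characters (hand port, exact: single strip char)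
def pcRstripBrace (s : String) : String :=
  String.ofList ((s.toList.reverse.dropWhile (· == '}')).reverse)

-- (s[5:-1] if s.endswith("}") else s[5:]).strip().rstrip("}")  with 5 = len("#{IF ")
def pcFeature (stripped : String) : String :=
  pcRstripBrace (PySem.Str.strip
    (if PySem.Str.endswith stripped "}" then PySem.Str.slice stripped (some 5) (some (-1))
     else PySem.Str.slice stripped (some 5) none))

-- features.get(f, False)  (dict → assoc list, first match)
def pcGet (features : List (String × Bool)) (f : String) : Bool :=
  (PySem.Dict.mk features).getD f false

-- ===== PORT A =====
-- loop body of A: state = (result, skip_stack); push = ++ [b], pop = dropLast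
def pcAStep (features : List (String × Bool)) (st : List String × List Bool)
    (line : String) : List String × List Bool :=
  let stripped := PySem.Str.strip line
  if PySem.Str.startswith stripped "#{IF " then
    let active := pcGet features (pcFeature stripped)
    (st.1, st.2 ++ [!active])
  else if PySem.Str.startswith stripped "#{ENDIF " then
    (st.1, if st.2.isEmpty then st.2 else st.2.dropLast)
  else if (!st.2.isEmpty) && st.2.any id then
    st
  else
    (st.1 ++ [line], st.2)

def process_conditionals (text : String) (features : List (String × Bool)) : String :=
  PySem.Str.join "\n" ((pcSplitLines text).foldl (pcAStep features) ([], [])).1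

-- ===== PORT B =====
-- parse_block: consume lines up to and including the closing ENDIF (or EOF), returning
-- (kept body, remaining lines).  The fuel argument is only a totality guard: each
-- consumed line costs one unit, so fuel = number of lines always suffices.
def pcBlockF (features : List (String × Bool)) : Nat → List String → List String × List String
  | 0, l => ([], l)
  | _ + 1, [] => ([], [])
  | n + 1, line :: rest =>
    let s := PySem.Str.strip line
    if PySem.Str.startswith s "#{IF " then
      let p := pcBlockF features n rest
      let q := pcBlockF features n p.2
      ((if pcGet features (pcFeature s) then p.1 else []) ++ q.1, q.2)
    else if PySem.Str.startswith s "#{ENDIF " then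
      ([], rest)
    else
      let q := pcBlockF features n rest
      (line :: q.1, q.2)

-- top-level loop: like a block body, but a stray ENDIF is simply dropped
def pcTopF (features : List (String × Bool)) : Nat → List String → List String
  | 0, _ => []
  | _ + 1, [] => []
  | n + 1, line :: rest =>
    let s := PySem.Str.strip line
    if PySem.Str.startswith s "#{IF " then
      let p := pcBlockF features n rest
      (if pcGet features (pcFeature s) then p.1 else []) ++ pcTopF features n p.2
    else if PySem.Str.startswith s "#{ENDIF " then
      pcTopF features n rest
    else
      line :: pcTopF features n rest

def process_conditionals_alt (text : String) (features : List (String × Bool)) : String :=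
  let lines := pcSplitLines text
  PySem.Str.join "\n" (pcTopF features lines.length lines)

-- ===== PRECONDITION & SPEC =====
def Spec_process_conditionals (text : String) (features : List (String × Bool)) (out : String) : Prop := out = process_conditionals_alt text features
instance (text : String) (features : List (String × Bool)) (out : String) : Decidable (Spec_process_conditionals text features out) := by unfold Spec_process_conditionals; infer_instance

-- ===== CLAIM (what is proved, stated in full; the proofs are below) =====
def Claim_equal_process_conditionals : Prop := ∀ (text : String) (features : List (String × Bool)), Dom_process_conditionals text features → Spec_process_conditionals text features (process_conditionals text features)

-- ===== LEMMAS AND PROOFS =====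

-- the remainder returned by pcBlockF is never longer than its input
theorem pcBlockF_len (features : List (String × Bool)) :
    ∀ (fuel : Nat) (lines : List String),
      (pcBlockF features fuel lines).2.length ≤ lines.length := by
  intro fuel
  induction fuel with
  | zero => intro lines; simp [pcBlockF]
  | succ n ih =>
    intro lines
    cases lines with
    | nil => simp [pcBlockF]
    | cons line rest =>
      have hr := ih rest
      have hq := ih (pcBlockF features n rest).2
      simp only [pcBlockF, List.length_cons]
      split_ifs
      all_goals simp only []
      all_goals omega

-- core invariant: A's fold inside an open block equals the block body (kept iff no
-- enclosing skip) followed by the fold continued after the block with the stack popped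
theorem pc_block_eq (features : List (String × Bool)) :
    ∀ (fuel : Nat) (lines : List String), lines.length ≤ fuel →
    ∀ (out : List String) (stack : List Bool), stack ≠ [] →
      (lines.foldl (pcAStep features) (out, stack)).1 =
      ((pcBlockF features fuel lines).2.foldl (pcAStep features)
        (out ++ (if stack.any id then [] else (pcBlockF features fuel lines).1),
         stack.dropLast)).1 := by
  intro fuel
  induction fuel with
  | zero =>
    intro lines h out stack hs
    have : lines = [] := List.eq_nil_of_length_eq_zero (Nat.le_zero.mp h)
    subst this; simp [pcBlockF]
  | succ n ih =>
    intro lines h out stack hs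
    cases lines with
    | nil => simp [pcBlockF]
    | cons line rest =>
      have hrest : rest.length ≤ n := by simpa using h
      simp only [List.foldl_cons, pcBlockF]
      by_cases h1 : PySem.Chars.startswith (PySem.Chars.strip line.toList)
          ['#', '{', 'I', 'F', ' '] = true
      · set a := pcGet features (pcFeature (PySem.Str.strip line)) with ha
        have hstep : pcAStep features (out, stack) line = (out, stack ++ [!a]) := by
          simp [pcAStep, PySem.Str.startswith, h1, ha]
        have h1' : PySem.Str.startswith (PySem.Str.strip line) "#{IF " = true := by
          simpa [PySem.Str.startswith] using h1
        simp only [h1', if_true]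
        rw [hstep]
        set p := pcBlockF features n rest with hp
        set q := pcBlockF features n p.2 with hq
        rw [ih rest hrest out (stack ++ [!a]) (by simp)]
        have hdrop : (stack ++ [!a]).dropLast = stack := by simp
        rw [hdrop, ← hp]
        have hp2 : p.2.length ≤ n := le_trans (hp ▸ pcBlockF_len features n rest) hrest
        rw [ih p.2 hp2 _ stack hs, ← hq]
        have hacc :
            (out ++ (if (stack ++ [!a]).any id then [] else p.1)) ++
              (if stack.any id then [] else q.1) =
            out ++ (if stack.any id then [] else (if a = true then p.1 else []) ++ q.1) := by
          by_cases hany : stack.any id = true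
          · simp [hany]
          · simp only [Bool.not_eq_true] at hany
            by_cases hA : a = true <;> simp [hany, hA]
        rw [hacc]
      · have h1' : PySem.Str.startswith (PySem.Str.strip line) "#{IF " = false := by
          simpa [PySem.Str.startswith] using h1
        simp only [h1', Bool.false_eq_true, if_false]
        by_cases h2 : PySem.Chars.startswith (PySem.Chars.strip line.toList)
            ['#', '{', 'E', 'N', 'D', 'I', 'F', ' '] = true
        · have hne : stack.isEmpty = false := by simpa using hs
          have hstep : pcAStep features (out, stack) line = (out, stack.dropLast) := by
            simp [pcAStep, PySem.Str.startswith, h1, h2, hne]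
          have h2' : PySem.Str.startswith (PySem.Str.strip line) "#{ENDIF " = true := by
            simpa [PySem.Str.startswith] using h2
          simp only [h2', if_true]
          rw [hstep]
          simp
        · have h2' : PySem.Str.startswith (PySem.Str.strip line) "#{ENDIF " = false := by
            simpa [PySem.Str.startswith] using h2
          simp only [h2', Bool.false_eq_true, if_false]
          by_cases hany : stack.any id = true
          · have hne : stack.isEmpty = false := by simpa using hs
            have hstep : pcAStep features (out, stack) line = (out, stack) := by
              simp [pcAStep, PySem.Str.startswith, h1, h2, hne, hany]
            rw [hstep, ih rest hrest out stack hs]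
            simp [hany]
          · have hstep : pcAStep features (out, stack) line = (out ++ [line], stack) := by
              simp only [Bool.not_eq_true] at hany
              simp [pcAStep, PySem.Str.startswith, h1, h2, hany]
            rw [hstep, ih rest hrest (out ++ [line]) stack hs]
            simp only [Bool.not_eq_true] at hany
            simp [hany]

-- top level: A's fold from an empty stack produces exactly pcTopF
theorem pc_top_eq (features : List (String × Bool)) :
    ∀ (fuel : Nat) (lines : List String), lines.length ≤ fuel →
    ∀ (out : List String),
      (lines.foldl (pcAStep features) (out, [])).1 = out ++ pcTopF features fuel lines := by
  intro fuel
  induction fuel with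
  | zero =>
    intro lines h out
    have : lines = [] := List.eq_nil_of_length_eq_zero (Nat.le_zero.mp h)
    subst this; simp [pcTopF]
  | succ n ih =>
    intro lines h out
    cases lines with
    | nil => simp [pcTopF]
    | cons line rest =>
      have hrest : rest.length ≤ n := by simpa using h
      simp only [List.foldl_cons, pcTopF]
      by_cases h1 : PySem.Chars.startswith (PySem.Chars.strip line.toList)
          ['#', '{', 'I', 'F', ' '] = true
      · set a := pcGet features (pcFeature (PySem.Str.strip line)) with ha
        have hstep : pcAStep features (out, ([] : List Bool)) line = (out, [!a]) := by
          simp [pcAStep, PySem.Str.startswith, h1, ha]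
        have h1' : PySem.Str.startswith (PySem.Str.strip line) "#{IF " = true := by
          simpa [PySem.Str.startswith] using h1
        simp only [h1', if_true]
        rw [hstep]
        set p := pcBlockF features n rest with hp
        rw [pc_block_eq features n rest hrest out [!a] (by simp), ← hp]
        have hd : ([!a] : List Bool).dropLast = [] := rfl
        have hb : ([!a] : List Bool).any id = !a := by simp
        rw [hd, hb]
        have hp2 : p.2.length ≤ n := le_trans (hp ▸ pcBlockF_len features n rest) hrest
        rw [ih p.2 hp2]
        have hacc : (out ++ (if (!a) = true then [] else p.1)) =
            out ++ (if a = true then p.1 else []) := by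
          by_cases hA : a = true <;> simp [hA]
        rw [hacc, List.append_assoc]
      · have h1' : PySem.Str.startswith (PySem.Str.strip line) "#{IF " = false := by
          simpa [PySem.Str.startswith] using h1
        simp only [h1', Bool.false_eq_true, if_false]
        by_cases h2 : PySem.Chars.startswith (PySem.Chars.strip line.toList)
            ['#', '{', 'E', 'N', 'D', 'I', 'F', ' '] = true
        · have hstep : pcAStep features (out, ([] : List Bool)) line = (out, []) := by
            simp [pcAStep, PySem.Str.startswith, h1, h2]
          have h2' : PySem.Str.startswith (PySem.Str.strip line) "#{ENDIF " = true := by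
            simpa [PySem.Str.startswith] using h2
          simp only [h2', if_true]
          rw [hstep, ih rest hrest out]
        · have hstep : pcAStep features (out, ([] : List Bool)) line = (out ++ [line], []) := by
            simp [pcAStep, PySem.Str.startswith, h1, h2]
          have h2' : PySem.Str.startswith (PySem.Str.strip line) "#{ENDIF " = false := by
            simpa [PySem.Str.startswith] using h2
          simp only [h2', Bool.false_eq_true, if_false]
          rw [hstep, ih rest hrest (out ++ [line])]
          simp

-- ===== VERDICT (by name: the statement is the Claim_ definition above) =====
theorem process_conditionals_spec : Claim_equal_process_conditionals := by
  intro text features _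
  unfold Spec_process_conditionals process_conditionals process_conditionals_alt
  rw [pc_top_eq features (pcSplitLines text).length (pcSplitLines text) le_rfl []]
  simp
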